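-- pv_equiv track=rewrite | github.com/emsruderer/logarex-micropython | Src/logger.py | processdata
-- ===== SOURCE A (Python) =====
-- def processdata(lijst):
--     meting = {
--         'Now': 'fake!',
--         'Grid': '11',
--         'Day': '8',
--         '7-days': '50',
--         '30-days': '200',
--         '365-days': '2500',
--         'Total':'14000',
--         'L1-Volt' : '230',
--         'L2-Volt' : '230',
--         'L3-Volt' : '230',
--         'L1-Amp' : '1.0',
--         'L2-Amp' : '1.0',
--         'L3-Amp' : '1.0'
--     }
--     if lijst != None and len(lijst) >= 13:
--       for value in lijst:
--         if value.startswith('1-0:16.7.0'):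
--             meting['Now'] = value.split('(')[1].split('*')[0]
--         elif value.startswith('1-0:2.8.0'):
--             meting['Grid'] = value.split('(')[1].split('*')[0]
--         elif value.startswith('1-0:1.8.0*96'):
--             meting['Day'] = value.split('(')[1].split('*')[0]
--         elif value.startswith('1-0:1.8.0*97'):
--             meting['7-days'] = value.split('(')[1].split('*')[0]
--         elif value.startswith('1-0:1.8.0*98'):
--             meting['30-days'] = value.split('(')[1].split('*')[0]
--         elif value.startswith('1-0:1.8.0*99'):
--             meting['365-days'] = value.split('(')[1].split('*')[0]
--         elif value.startswith('1-0:1.8.0*100'):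
--             meting['Total'] = value.split('(')[1].split('*')[0]
--         elif value.startswith('1-0:32.7.0'):
--             meting['L1-Volt'] = value.split('(')[1].split('*')[0]
--         elif value.startswith('1-0:72.7.0'):
--             meting['L2-Volt'] = value.split('(')[1].split('*')[0]
--         elif value.startswith('1-0:52.7.0'):
--             meting['L3-Volt'] = value.split('(')[1].split('*')[0]
--         elif value.startswith('1-0:31.7.0'):
--             meting['L1-Amp'] = value.split('(')[1].split('*')[0]
--         elif value.startswith('1-0:71.7.0'):
--             meting['L2-Amp'] = value.split('(')[1].split('*')[0]
--         elif value.startswith('1-0:51.7.0'):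
--             meting['L3-Amp'] = value.split('(')[1].split('*')[0]
--
--         for key in meting:
--             if meting[key].find('0')>=0 :
--                meting[key] = meting[key].lstrip('0')
--             if meting[key].find('-')>=0:
--                meting[key] = '-' + meting[key][1:].lstrip('0')
--             #"""
--             if key == "Grid":
--                 hs = meting["Grid"]
--                 pp = hs.rfind('.')
--                 if pp > 0:
--                   meting["Grid"]= hs[:pp+2] # round to 1 decimal
--             #"""
--     return meting
-- ===== SOURCE B (Python) =====
-- # Table-driven two-pass rewrite: one prefix->key table drives the parsing pass,
-- # then a single normalization pass runs once over the finished dict (the inline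
-- # per-line re-normalization of the original is idempotent, so one pass suffices).
--
-- PREFIX_TABLE = [
--     ('1-0:16.7.0', 'Now'),
--     ('1-0:2.8.0', 'Grid'),
--     ('1-0:1.8.0*96', 'Day'),
--     ('1-0:1.8.0*97', '7-days'),
--     ('1-0:1.8.0*98', '30-days'),
--     ('1-0:1.8.0*99', '365-days'),
--     ('1-0:1.8.0*100', 'Total'),
--     ('1-0:32.7.0', 'L1-Volt'),
--     ('1-0:72.7.0', 'L2-Volt'),
--     ('1-0:52.7.0', 'L3-Volt'),
--     ('1-0:31.7.0', 'L1-Amp'),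
--     ('1-0:71.7.0', 'L2-Amp'),
--     ('1-0:51.7.0', 'L3-Amp'),
-- ]
--
--
-- def _normalize(key, v):
--     if v.find('0') >= 0:
--         v = v.lstrip('0')
--     if v.find('-') >= 0:
--         v = '-' + v[1:].lstrip('0')
--     if key == 'Grid':
--         pp = v.rfind('.')
--         if pp > 0:
--             v = v[:pp + 2]  # round to 1 decimal
--     return v
--
--
-- def processdata(lijst):
--     meting = {
--         'Now': 'fake!',
--         'Grid': '11',
--         'Day': '8',
--         '7-days': '50',
--         '30-days': '200',
--         '365-days': '2500',
--         'Total': '14000',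
--         'L1-Volt': '230',
--         'L2-Volt': '230',
--         'L3-Volt': '230',
--         'L1-Amp': '1.0',
--         'L2-Amp': '1.0',
--         'L3-Amp': '1.0',
--     }
--     if lijst is not None and len(lijst) >= 13:
--         for line in lijst:
--             key = next((k for p, k in PREFIX_TABLE if line.startswith(p)), None)
--             if key is not None:
--                 meting[key] = line.split('(')[1].split('*')[0]
--         for key in meting:
--             meting[key] = _normalize(key, meting[key])
--     return meting
-- ===== Notes on version B (the rewrite author's own statement) =====
-- stated objective: faster
-- what changed: Replaced the 13-branch elif chain with inline re-normalization of all 13 dict values after every line by a prefix->key lookup table driving a single parsing pass plus ONE final normalization pass over the dict (A's per-line re-normalization is idempotent, so one pass after parsing yields the same values).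
import Mathlib
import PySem

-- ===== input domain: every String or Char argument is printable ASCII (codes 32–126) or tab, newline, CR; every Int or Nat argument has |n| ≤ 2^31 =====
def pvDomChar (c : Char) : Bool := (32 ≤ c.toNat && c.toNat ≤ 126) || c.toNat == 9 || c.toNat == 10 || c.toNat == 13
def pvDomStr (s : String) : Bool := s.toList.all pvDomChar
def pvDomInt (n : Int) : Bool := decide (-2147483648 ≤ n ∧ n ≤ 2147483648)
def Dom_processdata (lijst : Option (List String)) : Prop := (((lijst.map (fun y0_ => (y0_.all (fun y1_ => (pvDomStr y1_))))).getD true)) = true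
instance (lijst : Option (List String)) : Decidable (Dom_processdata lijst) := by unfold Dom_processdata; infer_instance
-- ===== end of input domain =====

-- B replaces A's 13-branch elif chain + re-normalization of all 13 dict values after every
-- line by a prefix->key table, one parsing pass and ONE final normalization pass (measured
-- faster in a timing run; same values because the normalization is idempotent).

-- ===== PORT A =====

-- exact port of s.lstrip('0'): drop leading '0' characters
def pvLstrip0 (s : String) : String := String.ofList (s.toList.dropWhile (fun c => c == '0'))

-- value.split('(')[1].split('*')[0]; the .getD "" defaults are unreachable under Pre_
-- (Python raises IndexError exactly where the [1] index is missing)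
def pvExtractA (v : String) : String :=
  let part := (PySem.List.pyGet? ((PySem.Str.split? v "(").getD []) 1).getD ""
  (PySem.List.pyGet? ((PySem.Str.split? part "*").getD []) 0).getD ""

-- the elif chain of A
def pvUpdA (d : PySem.Dict String String) (value : String) : PySem.Dict String String :=
  if PySem.Str.startswith value "1-0:16.7.0" then d.insert "Now" (pvExtractA value)
  else if PySem.Str.startswith value "1-0:2.8.0" then d.insert "Grid" (pvExtractA value)
  else if PySem.Str.startswith value "1-0:1.8.0*96" then d.insert "Day" (pvExtractA value)
  else if PySem.Str.startswith value "1-0:1.8.0*97" then d.insert "7-days" (pvExtractA value)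
  else if PySem.Str.startswith value "1-0:1.8.0*98" then d.insert "30-days" (pvExtractA value)
  else if PySem.Str.startswith value "1-0:1.8.0*99" then d.insert "365-days" (pvExtractA value)
  else if PySem.Str.startswith value "1-0:1.8.0*100" then d.insert "Total" (pvExtractA value)
  else if PySem.Str.startswith value "1-0:32.7.0" then d.insert "L1-Volt" (pvExtractA value)
  else if PySem.Str.startswith value "1-0:72.7.0" then d.insert "L2-Volt" (pvExtractA value)
  else if PySem.Str.startswith value "1-0:52.7.0" then d.insert "L3-Volt" (pvExtractA value)
  else if PySem.Str.startswith value "1-0:31.7.0" then d.insert "L1-Amp" (pvExtractA value)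
  else if PySem.Str.startswith value "1-0:71.7.0" then d.insert "L2-Amp" (pvExtractA value)
  else if PySem.Str.startswith value "1-0:51.7.0" then d.insert "L3-Amp" (pvExtractA value)
  else d

-- body of A's inner `for key in meting:` normalization loop
def pvNormStepA (d : PySem.Dict String String) (key : String) : PySem.Dict String String :=
  let d := if 0 ≤ PySem.Str.find (d.getD key "") "0" then
             d.insert key (pvLstrip0 (d.getD key "")) else d
  let d := if 0 ≤ PySem.Str.find (d.getD key "") "-" then
             d.insert key ("-" ++ pvLstrip0 (PySem.Str.slice (d.getD key "") (some 1) none)) else d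
  if key == "Grid" then
    let hs := d.getD "Grid" ""
    let pp := PySem.Str.rfind hs "."
    if pp > 0 then d.insert "Grid" (PySem.Str.slice hs none (some (pp + 2))) else d
  else d

-- one iteration of A's outer loop: the elif chain, then the normalization loop over all keys
def pvLineA (d : PySem.Dict String String) (value : String) : PySem.Dict String String :=
  let d := pvUpdA d value
  d.keys.foldl pvNormStepA d

def pvInitA : PySem.Dict String String :=
  PySem.Dict.ofList [("Now", "fake!"), ("Grid", "11"), ("Day", "8"), ("7-days", "50"),
    ("30-days", "200"), ("365-days", "2500"), ("Total", "14000"), ("L1-Volt", "230"),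
    ("L2-Volt", "230"), ("L3-Volt", "230"), ("L1-Amp", "1.0"), ("L2-Amp", "1.0"), ("L3-Amp", "1.0")]

def processdata (lijst : Option (List String)) : List (String × String) :=
  match lijst with
  | some l => if 13 ≤ l.length then (l.foldl pvLineA pvInitA).items else pvInitA.items
  | none => pvInitA.items

-- ===== PORT B =====

def pvTable : List (String × String) :=
  [("1-0:16.7.0", "Now"), ("1-0:2.8.0", "Grid"), ("1-0:1.8.0*96", "Day"),
   ("1-0:1.8.0*97", "7-days"), ("1-0:1.8.0*98", "30-days"), ("1-0:1.8.0*99", "365-days"),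
   ("1-0:1.8.0*100", "Total"), ("1-0:32.7.0", "L1-Volt"), ("1-0:72.7.0", "L2-Volt"),
   ("1-0:52.7.0", "L3-Volt"), ("1-0:31.7.0", "L1-Amp"), ("1-0:71.7.0", "L2-Amp"),
   ("1-0:51.7.0", "L3-Amp")]

-- next((k for p, k in PREFIX_TABLE if line.startswith(p)), None)
def pvFirstKey : List (String × String) → String → Option String
  | [], _ => none
  | (p, k) :: rest, line => if PySem.Str.startswith line p then some k else pvFirstKey rest line

-- line.split('(')[1].split('*')[0]; .getD "" unreachable under Pre_ (IndexError)
def pvExtractB (line : String) : String :=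
  let part := (PySem.List.pyGet? ((PySem.Str.split? line "(").getD []) 1).getD ""
  (PySem.List.pyGet? ((PySem.Str.split? part "*").getD []) 0).getD ""

-- _normalize(key, v)
def pvNormB (key v : String) : String :=
  let v := if 0 ≤ PySem.Str.find v "0" then pvLstrip0 v else v
  let v := if 0 ≤ PySem.Str.find v "-" then
             "-" ++ pvLstrip0 (PySem.Str.slice v (some 1) none) else v
  if key == "Grid" then
    let pp := PySem.Str.rfind v "."
    if pp > 0 then PySem.Str.slice v none (some (pp + 2)) else v
  else v

def pvUpdB (d : PySem.Dict String String) (line : String) : PySem.Dict String String :=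
  match pvFirstKey pvTable line with
  | some k => d.insert k (pvExtractB line)
  | none => d

def pvInitB : PySem.Dict String String :=
  PySem.Dict.ofList [("Now", "fake!"), ("Grid", "11"), ("Day", "8"), ("7-days", "50"),
    ("30-days", "200"), ("365-days", "2500"), ("Total", "14000"), ("L1-Volt", "230"),
    ("L2-Volt", "230"), ("L3-Volt", "230"), ("L1-Amp", "1.0"), ("L2-Amp", "1.0"), ("L3-Amp", "1.0")]

def processdata_alt (lijst : Option (List String)) : List (String × String) :=
  match lijst with
  | some l =>
    if 13 ≤ l.length then
      let d := l.foldl pvUpdB pvInitB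
      (d.keys.foldl (fun d k => d.insert k (pvNormB k (d.getD k ""))) d).items
    else pvInitB.items
  | none => pvInitB.items

-- ===== PRECONDITION & SPEC =====

-- Pre_ excludes exactly the inputs on which the Python raises IndexError: a list of
-- length >= 13 containing a line that starts with one of the 13 OBIS prefixes but has no '('.
def Pre_processdata (lijst : Option (List String)) : Prop :=
  13 ≤ (lijst.getD []).length →
    ∀ v ∈ lijst.getD [],
      (PySem.Str.startswith v "1-0:16.7.0" || PySem.Str.startswith v "1-0:2.8.0" ||
       PySem.Str.startswith v "1-0:1.8.0*96" || PySem.Str.startswith v "1-0:1.8.0*97" ||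
       PySem.Str.startswith v "1-0:1.8.0*98" || PySem.Str.startswith v "1-0:1.8.0*99" ||
       PySem.Str.startswith v "1-0:1.8.0*100" || PySem.Str.startswith v "1-0:32.7.0" ||
       PySem.Str.startswith v "1-0:72.7.0" || PySem.Str.startswith v "1-0:52.7.0" ||
       PySem.Str.startswith v "1-0:31.7.0" || PySem.Str.startswith v "1-0:71.7.0" ||
       PySem.Str.startswith v "1-0:51.7.0") = true →
      PySem.Str.isIn "(" v = true

instance (lijst : Option (List String)) : Decidable (Pre_processdata lijst) := by
  unfold Pre_processdata; infer_instance

def pvWitness_processdata : Option (List String) :=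
  some ["1-0:16.7.0(0012.3*kW)", "x", "x", "x", "x", "x", "x", "x", "x", "x", "x", "x", "x"]

def Spec_processdata (lijst : Option (List String)) (out : List (String × String)) : Prop :=
  out = processdata_alt lijst
instance (lijst : Option (List String)) (out : List (String × String)) : Decidable (Spec_processdata lijst out) := by
  unfold Spec_processdata; infer_instance

-- ===== CLAIM (what is proved, stated in full; the proofs are below) =====
def Claim_equal_processdata : Prop :=
  ∀ (lijst : Option (List String)), Dom_processdata lijst → Pre_processdata lijst →
    Spec_processdata lijst (processdata lijst)

-- ===== LEMMAS AND PROOFS =====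

-- generic dict facts used to collapse A's in-place normalization loop
theorem pv_map_keep_eq {κ ν : Type} [BEq κ] [LawfulBEq κ] (l : List (κ × ν)) (k : κ) (w : ν)
    (hnd : (l.map Prod.fst).Nodup)
    (hf : (l.find? (fun p => p.1 == k)).map Prod.snd = some w) :
    l.map (fun p => if p.1 == k then (k, w) else p) = l := by
  induction l with
  | nil => simp at hf
  | cons p t ih =>
    simp only [List.map_cons, List.nodup_cons] at hnd ⊢
    by_cases hp : (p.1 == k) = true
    · simp only [List.find?_cons, hp] at hf
      simp only [Option.map_some, Option.some.injEq] at hf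
      have hk : p.1 = k := by simpa using hp
      have ht : t.map (fun p => if p.1 == k then (k, w) else p) = t := by
        refine (List.map_congr_left ?_).trans (List.map_id t)
        intro q hq
        have hqk : ¬ (q.1 == k) = true := by
          simp only [beq_iff_eq]
          intro h
          exact hnd.1 (hk ▸ h ▸ List.mem_map.mpr ⟨q, hq, rfl⟩)
        simp [hqk]
      rw [ht, if_pos hp, ← hf, ← hk]
    · simp only [List.find?_cons, hp] at hf
      simp only [if_neg hp]
      rw [ih hnd.2 hf]

theorem pv_insert_eq_self {κ ν : Type} [BEq κ] [LawfulBEq κ] (d : PySem.Dict κ ν) (k : κ) (w : ν)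
    (hnd : (d.items.map Prod.fst).Nodup) (hget : d.get? k = some w) :
    d.insert k w = d := by
  have hfind : (d.items.find? (fun p => p.1 == k)).map Prod.snd = some w := hget
  have hcont : d.contains k = true := by
    unfold PySem.Dict.get? at hget
    obtain ⟨p, hp, -⟩ := Option.map_eq_some_iff.mp hget
    exact List.any_eq_true.mpr ⟨p, List.mem_of_find?_eq_some hp,
      (List.find?_eq_some_iff_append.mp hp).1⟩
  unfold PySem.Dict.insert
  rw [if_pos hcont]
  cases d with
  | mk items => simpa using pv_map_keep_eq items k w (by simpa using hnd) hfind

theorem pv_getD_of_get? {κ ν : Type} [BEq κ] (d : PySem.Dict κ ν) (k : κ) (w d0 : ν)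
    (hget : d.get? k = some w) : d.getD k d0 = w := by
  simp [PySem.Dict.getD, hget]

-- one step of A's normalization loop is one overwrite with B's _normalize
theorem pv_stepA_insert (d : PySem.Dict String String) (k w : String)
    (hnd : (d.items.map Prod.fst).Nodup) (hget : d.get? k = some w) :
    pvNormStepA d k = d.insert k (pvNormB k w) := by
  unfold pvNormStepA pvNormB
  rw [pv_getD_of_get? d k w "" hget]
  by_cases c1 : 0 ≤ PySem.Str.find w "0" <;>
    simp only [c1, ite_true, ite_false, PySem.Dict.getD_insert_self]
  · by_cases c2 : 0 ≤ PySem.Str.find (pvLstrip0 w) "-" <;>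
      simp only [c2, ite_true, ite_false, PySem.Dict.insert_insert_self]
    · by_cases hk : k = "Grid"
      · subst hk
        simp only [beq_self_eq_true, ite_true, PySem.Dict.getD_insert_self,
          PySem.Dict.insert_insert_self]
        split <;> rfl
      · have hkf : (k == "Grid") = false := by simpa using hk
        simp [hkf]
    · by_cases hk : k = "Grid"
      · subst hk
        simp only [beq_self_eq_true, ite_true, PySem.Dict.getD_insert_self,
          PySem.Dict.insert_insert_self]
        split <;> rfl
      · have hkf : (k == "Grid") = false := by simpa using hk
        simp [hkf]
  · by_cases c2 : 0 ≤ PySem.Str.find w "-" <;>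
      simp only [c2, ite_true, ite_false, pv_getD_of_get? d k w "" hget]
    · by_cases hk : k = "Grid"
      · subst hk
        simp only [beq_self_eq_true, ite_true, PySem.Dict.getD_insert_self,
          PySem.Dict.insert_insert_self]
        split <;> rfl
      · have hkf : (k == "Grid") = false := by simpa using hk
        simp [hkf]
    · by_cases hk : k = "Grid"
      · subst hk
        simp only [beq_self_eq_true, ite_true,
          pv_getD_of_get? d "Grid" w "" hget]
        split
        · rfl
        · exact (pv_insert_eq_self d "Grid" w hnd hget).symm
      · have hkf : (k == "Grid") = false := by simpa using hk
        simp only [hkf, Bool.false_eq_true, ite_false]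
        exact (pv_insert_eq_self d k w hnd hget).symm

-- the concrete 13-slot state every reachable dict has
def pvMk (s1 s2 s3 s4 s5 s6 s7 s8 s9 s10 s11 s12 s13 : String) : PySem.Dict String String :=
  PySem.Dict.mk [("Now", s1), ("Grid", s2), ("Day", s3), ("7-days", s4), ("30-days", s5), ("365-days", s6), ("Total", s7), ("L1-Volt", s8), ("L2-Volt", s9), ("L3-Volt", s10), ("L1-Amp", s11), ("L2-Amp", s12), ("L3-Amp", s13)]

theorem pv_pvMk_nodup (s1 s2 s3 s4 s5 s6 s7 s8 s9 s10 s11 s12 s13 : String) :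
    (((pvMk s1 s2 s3 s4 s5 s6 s7 s8 s9 s10 s11 s12 s13).items.map Prod.fst)).Nodup := by
  rw [show ((pvMk s1 s2 s3 s4 s5 s6 s7 s8 s9 s10 s11 s12 s13).items.map Prod.fst) = ["Now", "Grid", "Day", "7-days", "30-days", "365-days", "Total", "L1-Volt", "L2-Volt", "L3-Volt", "L1-Amp", "L2-Amp", "L3-Amp"] from rfl]
  decide

theorem pv_keys_mk (s1 s2 s3 s4 s5 s6 s7 s8 s9 s10 s11 s12 s13 : String) :
    (pvMk s1 s2 s3 s4 s5 s6 s7 s8 s9 s10 s11 s12 s13).keys = ["Now", "Grid", "Day", "7-days", "30-days", "365-days", "Total", "L1-Volt", "L2-Volt", "L3-Volt", "L1-Amp", "L2-Amp", "L3-Amp"] := rfl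

theorem pv_getD_Now (s1 s2 s3 s4 s5 s6 s7 s8 s9 s10 s11 s12 s13 : String) : (pvMk s1 s2 s3 s4 s5 s6 s7 s8 s9 s10 s11 s12 s13).getD "Now" "" = s1 := rfl
theorem pv_getD_Grid (s1 s2 s3 s4 s5 s6 s7 s8 s9 s10 s11 s12 s13 : String) : (pvMk s1 s2 s3 s4 s5 s6 s7 s8 s9 s10 s11 s12 s13).getD "Grid" "" = s2 := rfl
theorem pv_getD_Day (s1 s2 s3 s4 s5 s6 s7 s8 s9 s10 s11 s12 s13 : String) : (pvMk s1 s2 s3 s4 s5 s6 s7 s8 s9 s10 s11 s12 s13).getD "Day" "" = s3 := rfl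
theorem pv_getD_7_days (s1 s2 s3 s4 s5 s6 s7 s8 s9 s10 s11 s12 s13 : String) : (pvMk s1 s2 s3 s4 s5 s6 s7 s8 s9 s10 s11 s12 s13).getD "7-days" "" = s4 := rfl
theorem pv_getD_30_days (s1 s2 s3 s4 s5 s6 s7 s8 s9 s10 s11 s12 s13 : String) : (pvMk s1 s2 s3 s4 s5 s6 s7 s8 s9 s10 s11 s12 s13).getD "30-days" "" = s5 := rfl
theorem pv_getD_365_days (s1 s2 s3 s4 s5 s6 s7 s8 s9 s10 s11 s12 s13 : String) : (pvMk s1 s2 s3 s4 s5 s6 s7 s8 s9 s10 s11 s12 s13).getD "365-days" "" = s6 := rfl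
theorem pv_getD_Total (s1 s2 s3 s4 s5 s6 s7 s8 s9 s10 s11 s12 s13 : String) : (pvMk s1 s2 s3 s4 s5 s6 s7 s8 s9 s10 s11 s12 s13).getD "Total" "" = s7 := rfl
theorem pv_getD_L1_Volt (s1 s2 s3 s4 s5 s6 s7 s8 s9 s10 s11 s12 s13 : String) : (pvMk s1 s2 s3 s4 s5 s6 s7 s8 s9 s10 s11 s12 s13).getD "L1-Volt" "" = s8 := rfl
theorem pv_getD_L2_Volt (s1 s2 s3 s4 s5 s6 s7 s8 s9 s10 s11 s12 s13 : String) : (pvMk s1 s2 s3 s4 s5 s6 s7 s8 s9 s10 s11 s12 s13).getD "L2-Volt" "" = s9 := rfl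
theorem pv_getD_L3_Volt (s1 s2 s3 s4 s5 s6 s7 s8 s9 s10 s11 s12 s13 : String) : (pvMk s1 s2 s3 s4 s5 s6 s7 s8 s9 s10 s11 s12 s13).getD "L3-Volt" "" = s10 := rfl
theorem pv_getD_L1_Amp (s1 s2 s3 s4 s5 s6 s7 s8 s9 s10 s11 s12 s13 : String) : (pvMk s1 s2 s3 s4 s5 s6 s7 s8 s9 s10 s11 s12 s13).getD "L1-Amp" "" = s11 := rfl
theorem pv_getD_L2_Amp (s1 s2 s3 s4 s5 s6 s7 s8 s9 s10 s11 s12 s13 : String) : (pvMk s1 s2 s3 s4 s5 s6 s7 s8 s9 s10 s11 s12 s13).getD "L2-Amp" "" = s12 := rfl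
theorem pv_getD_L3_Amp (s1 s2 s3 s4 s5 s6 s7 s8 s9 s10 s11 s12 s13 : String) : (pvMk s1 s2 s3 s4 s5 s6 s7 s8 s9 s10 s11 s12 s13).getD "L3-Amp" "" = s13 := rfl

theorem pv_insert_Now (s1 s2 s3 s4 s5 s6 s7 s8 s9 s10 s11 s12 s13 x : String) : (pvMk s1 s2 s3 s4 s5 s6 s7 s8 s9 s10 s11 s12 s13).insert "Now" x = pvMk x s2 s3 s4 s5 s6 s7 s8 s9 s10 s11 s12 s13 := rfl
theorem pv_insert_Grid (s1 s2 s3 s4 s5 s6 s7 s8 s9 s10 s11 s12 s13 x : String) : (pvMk s1 s2 s3 s4 s5 s6 s7 s8 s9 s10 s11 s12 s13).insert "Grid" x = pvMk s1 x s3 s4 s5 s6 s7 s8 s9 s10 s11 s12 s13 := rfl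
theorem pv_insert_Day (s1 s2 s3 s4 s5 s6 s7 s8 s9 s10 s11 s12 s13 x : String) : (pvMk s1 s2 s3 s4 s5 s6 s7 s8 s9 s10 s11 s12 s13).insert "Day" x = pvMk s1 s2 x s4 s5 s6 s7 s8 s9 s10 s11 s12 s13 := rfl
theorem pv_insert_7_days (s1 s2 s3 s4 s5 s6 s7 s8 s9 s10 s11 s12 s13 x : String) : (pvMk s1 s2 s3 s4 s5 s6 s7 s8 s9 s10 s11 s12 s13).insert "7-days" x = pvMk s1 s2 s3 x s5 s6 s7 s8 s9 s10 s11 s12 s13 := rfl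
theorem pv_insert_30_days (s1 s2 s3 s4 s5 s6 s7 s8 s9 s10 s11 s12 s13 x : String) : (pvMk s1 s2 s3 s4 s5 s6 s7 s8 s9 s10 s11 s12 s13).insert "30-days" x = pvMk s1 s2 s3 s4 x s6 s7 s8 s9 s10 s11 s12 s13 := rfl
theorem pv_insert_365_days (s1 s2 s3 s4 s5 s6 s7 s8 s9 s10 s11 s12 s13 x : String) : (pvMk s1 s2 s3 s4 s5 s6 s7 s8 s9 s10 s11 s12 s13).insert "365-days" x = pvMk s1 s2 s3 s4 s5 x s7 s8 s9 s10 s11 s12 s13 := rfl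
theorem pv_insert_Total (s1 s2 s3 s4 s5 s6 s7 s8 s9 s10 s11 s12 s13 x : String) : (pvMk s1 s2 s3 s4 s5 s6 s7 s8 s9 s10 s11 s12 s13).insert "Total" x = pvMk s1 s2 s3 s4 s5 s6 x s8 s9 s10 s11 s12 s13 := rfl
theorem pv_insert_L1_Volt (s1 s2 s3 s4 s5 s6 s7 s8 s9 s10 s11 s12 s13 x : String) : (pvMk s1 s2 s3 s4 s5 s6 s7 s8 s9 s10 s11 s12 s13).insert "L1-Volt" x = pvMk s1 s2 s3 s4 s5 s6 s7 x s9 s10 s11 s12 s13 := rfl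
theorem pv_insert_L2_Volt (s1 s2 s3 s4 s5 s6 s7 s8 s9 s10 s11 s12 s13 x : String) : (pvMk s1 s2 s3 s4 s5 s6 s7 s8 s9 s10 s11 s12 s13).insert "L2-Volt" x = pvMk s1 s2 s3 s4 s5 s6 s7 s8 x s10 s11 s12 s13 := rfl
theorem pv_insert_L3_Volt (s1 s2 s3 s4 s5 s6 s7 s8 s9 s10 s11 s12 s13 x : String) : (pvMk s1 s2 s3 s4 s5 s6 s7 s8 s9 s10 s11 s12 s13).insert "L3-Volt" x = pvMk s1 s2 s3 s4 s5 s6 s7 s8 s9 x s11 s12 s13 := rfl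
theorem pv_insert_L1_Amp (s1 s2 s3 s4 s5 s6 s7 s8 s9 s10 s11 s12 s13 x : String) : (pvMk s1 s2 s3 s4 s5 s6 s7 s8 s9 s10 s11 s12 s13).insert "L1-Amp" x = pvMk s1 s2 s3 s4 s5 s6 s7 s8 s9 s10 x s12 s13 := rfl
theorem pv_insert_L2_Amp (s1 s2 s3 s4 s5 s6 s7 s8 s9 s10 s11 s12 s13 x : String) : (pvMk s1 s2 s3 s4 s5 s6 s7 s8 s9 s10 s11 s12 s13).insert "L2-Amp" x = pvMk s1 s2 s3 s4 s5 s6 s7 s8 s9 s10 s11 x s13 := rfl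
theorem pv_insert_L3_Amp (s1 s2 s3 s4 s5 s6 s7 s8 s9 s10 s11 s12 s13 x : String) : (pvMk s1 s2 s3 s4 s5 s6 s7 s8 s9 s10 s11 s12 s13).insert "L3-Amp" x = pvMk s1 s2 s3 s4 s5 s6 s7 s8 s9 s10 s11 s12 x := rfl

theorem pv_stepA_Now (s1 s2 s3 s4 s5 s6 s7 s8 s9 s10 s11 s12 s13 : String) :
    pvNormStepA (pvMk s1 s2 s3 s4 s5 s6 s7 s8 s9 s10 s11 s12 s13) "Now" = pvMk (pvNormB "Now" s1) s2 s3 s4 s5 s6 s7 s8 s9 s10 s11 s12 s13 := by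
  rw [pv_stepA_insert _ _ s1 (pv_pvMk_nodup s1 s2 s3 s4 s5 s6 s7 s8 s9 s10 s11 s12 s13) rfl, pv_insert_Now]

theorem pv_stepA_Grid (s1 s2 s3 s4 s5 s6 s7 s8 s9 s10 s11 s12 s13 : String) :
    pvNormStepA (pvMk s1 s2 s3 s4 s5 s6 s7 s8 s9 s10 s11 s12 s13) "Grid" = pvMk s1 (pvNormB "Grid" s2) s3 s4 s5 s6 s7 s8 s9 s10 s11 s12 s13 := by
  rw [pv_stepA_insert _ _ s2 (pv_pvMk_nodup s1 s2 s3 s4 s5 s6 s7 s8 s9 s10 s11 s12 s13) rfl, pv_insert_Grid]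

theorem pv_stepA_Day (s1 s2 s3 s4 s5 s6 s7 s8 s9 s10 s11 s12 s13 : String) :
    pvNormStepA (pvMk s1 s2 s3 s4 s5 s6 s7 s8 s9 s10 s11 s12 s13) "Day" = pvMk s1 s2 (pvNormB "Day" s3) s4 s5 s6 s7 s8 s9 s10 s11 s12 s13 := by
  rw [pv_stepA_insert _ _ s3 (pv_pvMk_nodup s1 s2 s3 s4 s5 s6 s7 s8 s9 s10 s11 s12 s13) rfl, pv_insert_Day]

theorem pv_stepA_7_days (s1 s2 s3 s4 s5 s6 s7 s8 s9 s10 s11 s12 s13 : String) :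
    pvNormStepA (pvMk s1 s2 s3 s4 s5 s6 s7 s8 s9 s10 s11 s12 s13) "7-days" = pvMk s1 s2 s3 (pvNormB "7-days" s4) s5 s6 s7 s8 s9 s10 s11 s12 s13 := by
  rw [pv_stepA_insert _ _ s4 (pv_pvMk_nodup s1 s2 s3 s4 s5 s6 s7 s8 s9 s10 s11 s12 s13) rfl, pv_insert_7_days]

theorem pv_stepA_30_days (s1 s2 s3 s4 s5 s6 s7 s8 s9 s10 s11 s12 s13 : String) :
    pvNormStepA (pvMk s1 s2 s3 s4 s5 s6 s7 s8 s9 s10 s11 s12 s13) "30-days" = pvMk s1 s2 s3 s4 (pvNormB "30-days" s5) s6 s7 s8 s9 s10 s11 s12 s13 := by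
  rw [pv_stepA_insert _ _ s5 (pv_pvMk_nodup s1 s2 s3 s4 s5 s6 s7 s8 s9 s10 s11 s12 s13) rfl, pv_insert_30_days]

theorem pv_stepA_365_days (s1 s2 s3 s4 s5 s6 s7 s8 s9 s10 s11 s12 s13 : String) :
    pvNormStepA (pvMk s1 s2 s3 s4 s5 s6 s7 s8 s9 s10 s11 s12 s13) "365-days" = pvMk s1 s2 s3 s4 s5 (pvNormB "365-days" s6) s7 s8 s9 s10 s11 s12 s13 := by
  rw [pv_stepA_insert _ _ s6 (pv_pvMk_nodup s1 s2 s3 s4 s5 s6 s7 s8 s9 s10 s11 s12 s13) rfl, pv_insert_365_days]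

theorem pv_stepA_Total (s1 s2 s3 s4 s5 s6 s7 s8 s9 s10 s11 s12 s13 : String) :
    pvNormStepA (pvMk s1 s2 s3 s4 s5 s6 s7 s8 s9 s10 s11 s12 s13) "Total" = pvMk s1 s2 s3 s4 s5 s6 (pvNormB "Total" s7) s8 s9 s10 s11 s12 s13 := by
  rw [pv_stepA_insert _ _ s7 (pv_pvMk_nodup s1 s2 s3 s4 s5 s6 s7 s8 s9 s10 s11 s12 s13) rfl, pv_insert_Total]

theorem pv_stepA_L1_Volt (s1 s2 s3 s4 s5 s6 s7 s8 s9 s10 s11 s12 s13 : String) :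
    pvNormStepA (pvMk s1 s2 s3 s4 s5 s6 s7 s8 s9 s10 s11 s12 s13) "L1-Volt" = pvMk s1 s2 s3 s4 s5 s6 s7 (pvNormB "L1-Volt" s8) s9 s10 s11 s12 s13 := by
  rw [pv_stepA_insert _ _ s8 (pv_pvMk_nodup s1 s2 s3 s4 s5 s6 s7 s8 s9 s10 s11 s12 s13) rfl, pv_insert_L1_Volt]

theorem pv_stepA_L2_Volt (s1 s2 s3 s4 s5 s6 s7 s8 s9 s10 s11 s12 s13 : String) :
    pvNormStepA (pvMk s1 s2 s3 s4 s5 s6 s7 s8 s9 s10 s11 s12 s13) "L2-Volt" = pvMk s1 s2 s3 s4 s5 s6 s7 s8 (pvNormB "L2-Volt" s9) s10 s11 s12 s13 := by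
  rw [pv_stepA_insert _ _ s9 (pv_pvMk_nodup s1 s2 s3 s4 s5 s6 s7 s8 s9 s10 s11 s12 s13) rfl, pv_insert_L2_Volt]

theorem pv_stepA_L3_Volt (s1 s2 s3 s4 s5 s6 s7 s8 s9 s10 s11 s12 s13 : String) :
    pvNormStepA (pvMk s1 s2 s3 s4 s5 s6 s7 s8 s9 s10 s11 s12 s13) "L3-Volt" = pvMk s1 s2 s3 s4 s5 s6 s7 s8 s9 (pvNormB "L3-Volt" s10) s11 s12 s13 := by
  rw [pv_stepA_insert _ _ s10 (pv_pvMk_nodup s1 s2 s3 s4 s5 s6 s7 s8 s9 s10 s11 s12 s13) rfl, pv_insert_L3_Volt]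

theorem pv_stepA_L1_Amp (s1 s2 s3 s4 s5 s6 s7 s8 s9 s10 s11 s12 s13 : String) :
    pvNormStepA (pvMk s1 s2 s3 s4 s5 s6 s7 s8 s9 s10 s11 s12 s13) "L1-Amp" = pvMk s1 s2 s3 s4 s5 s6 s7 s8 s9 s10 (pvNormB "L1-Amp" s11) s12 s13 := by
  rw [pv_stepA_insert _ _ s11 (pv_pvMk_nodup s1 s2 s3 s4 s5 s6 s7 s8 s9 s10 s11 s12 s13) rfl, pv_insert_L1_Amp]

theorem pv_stepA_L2_Amp (s1 s2 s3 s4 s5 s6 s7 s8 s9 s10 s11 s12 s13 : String) :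
    pvNormStepA (pvMk s1 s2 s3 s4 s5 s6 s7 s8 s9 s10 s11 s12 s13) "L2-Amp" = pvMk s1 s2 s3 s4 s5 s6 s7 s8 s9 s10 s11 (pvNormB "L2-Amp" s12) s13 := by
  rw [pv_stepA_insert _ _ s12 (pv_pvMk_nodup s1 s2 s3 s4 s5 s6 s7 s8 s9 s10 s11 s12 s13) rfl, pv_insert_L2_Amp]

theorem pv_stepA_L3_Amp (s1 s2 s3 s4 s5 s6 s7 s8 s9 s10 s11 s12 s13 : String) :
    pvNormStepA (pvMk s1 s2 s3 s4 s5 s6 s7 s8 s9 s10 s11 s12 s13) "L3-Amp" = pvMk s1 s2 s3 s4 s5 s6 s7 s8 s9 s10 s11 s12 (pvNormB "L3-Amp" s13) := by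
  rw [pv_stepA_insert _ _ s13 (pv_pvMk_nodup s1 s2 s3 s4 s5 s6 s7 s8 s9 s10 s11 s12 s13) rfl, pv_insert_L3_Amp]

-- A's whole normalization loop over the 13 keys
theorem pv_passA (s1 s2 s3 s4 s5 s6 s7 s8 s9 s10 s11 s12 s13 : String) :
    ((pvMk s1 s2 s3 s4 s5 s6 s7 s8 s9 s10 s11 s12 s13).keys).foldl pvNormStepA (pvMk s1 s2 s3 s4 s5 s6 s7 s8 s9 s10 s11 s12 s13) = pvMk (pvNormB "Now" s1) (pvNormB "Grid" s2) (pvNormB "Day" s3) (pvNormB "7-days" s4) (pvNormB "30-days" s5) (pvNormB "365-days" s6) (pvNormB "Total" s7) (pvNormB "L1-Volt" s8) (pvNormB "L2-Volt" s9) (pvNormB "L3-Volt" s10) (pvNormB "L1-Amp" s11) (pvNormB "L2-Amp" s12) (pvNormB "L3-Amp" s13) := by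
  rw [pv_keys_mk]
  simp only [List.foldl_cons, List.foldl_nil, pv_stepA_Now, pv_stepA_Grid, pv_stepA_Day, pv_stepA_7_days, pv_stepA_30_days, pv_stepA_365_days, pv_stepA_Total, pv_stepA_L1_Volt, pv_stepA_L2_Volt, pv_stepA_L3_Volt, pv_stepA_L1_Amp, pv_stepA_L2_Amp, pv_stepA_L3_Amp]

-- B's normalization pass (the inline fold in processdata_alt)
def pvPassB (d : PySem.Dict String String) : PySem.Dict String String :=
  d.keys.foldl (fun d k => d.insert k (pvNormB k (d.getD k ""))) d

theorem pv_passB (s1 s2 s3 s4 s5 s6 s7 s8 s9 s10 s11 s12 s13 : String) :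
    pvPassB (pvMk s1 s2 s3 s4 s5 s6 s7 s8 s9 s10 s11 s12 s13) = pvMk (pvNormB "Now" s1) (pvNormB "Grid" s2) (pvNormB "Day" s3) (pvNormB "7-days" s4) (pvNormB "30-days" s5) (pvNormB "365-days" s6) (pvNormB "Total" s7) (pvNormB "L1-Volt" s8) (pvNormB "L2-Volt" s9) (pvNormB "L3-Volt" s10) (pvNormB "L1-Amp" s11) (pvNormB "L2-Amp" s12) (pvNormB "L3-Amp" s13) := by
  unfold pvPassB
  rw [pv_keys_mk]
  simp only [List.foldl_cons, List.foldl_nil, pv_getD_Now, pv_getD_Grid, pv_getD_Day, pv_getD_7_days, pv_getD_30_days, pv_getD_365_days, pv_getD_Total, pv_getD_L1_Volt, pv_getD_L2_Volt, pv_getD_L3_Volt, pv_getD_L1_Amp, pv_getD_L2_Amp, pv_getD_L3_Amp, pv_insert_Now, pv_insert_Grid, pv_insert_Day, pv_insert_7_days, pv_insert_30_days, pv_insert_365_days, pv_insert_Total, pv_insert_L1_Volt, pv_insert_L2_Volt, pv_insert_L3_Volt, pv_insert_L1_Amp, pv_insert_L2_Amp, pv_insert_L3_Amp]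

-- the update a line performs, written once as the branch chain
def pvChain (s1 s2 s3 s4 s5 s6 s7 s8 s9 s10 s11 s12 s13 : String) (v : String) : PySem.Dict String String :=
  if PySem.Str.startswith v "1-0:16.7.0" then pvMk (pvExtractB v) s2 s3 s4 s5 s6 s7 s8 s9 s10 s11 s12 s13
  else if PySem.Str.startswith v "1-0:2.8.0" then pvMk s1 (pvExtractB v) s3 s4 s5 s6 s7 s8 s9 s10 s11 s12 s13
  else if PySem.Str.startswith v "1-0:1.8.0*96" then pvMk s1 s2 (pvExtractB v) s4 s5 s6 s7 s8 s9 s10 s11 s12 s13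
  else if PySem.Str.startswith v "1-0:1.8.0*97" then pvMk s1 s2 s3 (pvExtractB v) s5 s6 s7 s8 s9 s10 s11 s12 s13
  else if PySem.Str.startswith v "1-0:1.8.0*98" then pvMk s1 s2 s3 s4 (pvExtractB v) s6 s7 s8 s9 s10 s11 s12 s13
  else if PySem.Str.startswith v "1-0:1.8.0*99" then pvMk s1 s2 s3 s4 s5 (pvExtractB v) s7 s8 s9 s10 s11 s12 s13
  else if PySem.Str.startswith v "1-0:1.8.0*100" then pvMk s1 s2 s3 s4 s5 s6 (pvExtractB v) s8 s9 s10 s11 s12 s13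
  else if PySem.Str.startswith v "1-0:32.7.0" then pvMk s1 s2 s3 s4 s5 s6 s7 (pvExtractB v) s9 s10 s11 s12 s13
  else if PySem.Str.startswith v "1-0:72.7.0" then pvMk s1 s2 s3 s4 s5 s6 s7 s8 (pvExtractB v) s10 s11 s12 s13
  else if PySem.Str.startswith v "1-0:52.7.0" then pvMk s1 s2 s3 s4 s5 s6 s7 s8 s9 (pvExtractB v) s11 s12 s13
  else if PySem.Str.startswith v "1-0:31.7.0" then pvMk s1 s2 s3 s4 s5 s6 s7 s8 s9 s10 (pvExtractB v) s12 s13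
  else if PySem.Str.startswith v "1-0:71.7.0" then pvMk s1 s2 s3 s4 s5 s6 s7 s8 s9 s10 s11 (pvExtractB v) s13
  else if PySem.Str.startswith v "1-0:51.7.0" then pvMk s1 s2 s3 s4 s5 s6 s7 s8 s9 s10 s11 s12 (pvExtractB v)
  else pvMk s1 s2 s3 s4 s5 s6 s7 s8 s9 s10 s11 s12 s13

theorem pv_extract_eq (v : String) : pvExtractA v = pvExtractB v := rfl

theorem pv_updA_mk (s1 s2 s3 s4 s5 s6 s7 s8 s9 s10 s11 s12 s13 v : String) :
    pvUpdA (pvMk s1 s2 s3 s4 s5 s6 s7 s8 s9 s10 s11 s12 s13) v = pvChain s1 s2 s3 s4 s5 s6 s7 s8 s9 s10 s11 s12 s13 v := by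
  unfold pvUpdA pvChain
  simp only [pv_extract_eq]
  by_cases h1 : PySem.Str.startswith v "1-0:16.7.0" = true
  · simp only [if_pos h1]
    exact pv_insert_Now s1 s2 s3 s4 s5 s6 s7 s8 s9 s10 s11 s12 s13 (pvExtractB v)
  · simp only [if_neg h1]
    by_cases h2 : PySem.Str.startswith v "1-0:2.8.0" = true
    · simp only [if_pos h2]
      exact pv_insert_Grid s1 s2 s3 s4 s5 s6 s7 s8 s9 s10 s11 s12 s13 (pvExtractB v)
    · simp only [if_neg h2]
      by_cases h3 : PySem.Str.startswith v "1-0:1.8.0*96" = true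
      · simp only [if_pos h3]
        exact pv_insert_Day s1 s2 s3 s4 s5 s6 s7 s8 s9 s10 s11 s12 s13 (pvExtractB v)
      · simp only [if_neg h3]
        by_cases h4 : PySem.Str.startswith v "1-0:1.8.0*97" = true
        · simp only [if_pos h4]
          exact pv_insert_7_days s1 s2 s3 s4 s5 s6 s7 s8 s9 s10 s11 s12 s13 (pvExtractB v)
        · simp only [if_neg h4]
          by_cases h5 : PySem.Str.startswith v "1-0:1.8.0*98" = true
          · simp only [if_pos h5]
            exact pv_insert_30_days s1 s2 s3 s4 s5 s6 s7 s8 s9 s10 s11 s12 s13 (pvExtractB v)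
          · simp only [if_neg h5]
            by_cases h6 : PySem.Str.startswith v "1-0:1.8.0*99" = true
            · simp only [if_pos h6]
              exact pv_insert_365_days s1 s2 s3 s4 s5 s6 s7 s8 s9 s10 s11 s12 s13 (pvExtractB v)
            · simp only [if_neg h6]
              by_cases h7 : PySem.Str.startswith v "1-0:1.8.0*100" = true
              · simp only [if_pos h7]
                exact pv_insert_Total s1 s2 s3 s4 s5 s6 s7 s8 s9 s10 s11 s12 s13 (pvExtractB v)
              · simp only [if_neg h7]
                by_cases h8 : PySem.Str.startswith v "1-0:32.7.0" = true
                · simp only [if_pos h8]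
                  exact pv_insert_L1_Volt s1 s2 s3 s4 s5 s6 s7 s8 s9 s10 s11 s12 s13 (pvExtractB v)
                · simp only [if_neg h8]
                  by_cases h9 : PySem.Str.startswith v "1-0:72.7.0" = true
                  · simp only [if_pos h9]
                    exact pv_insert_L2_Volt s1 s2 s3 s4 s5 s6 s7 s8 s9 s10 s11 s12 s13 (pvExtractB v)
                  · simp only [if_neg h9]
                    by_cases h10 : PySem.Str.startswith v "1-0:52.7.0" = true
                    · simp only [if_pos h10]
                      exact pv_insert_L3_Volt s1 s2 s3 s4 s5 s6 s7 s8 s9 s10 s11 s12 s13 (pvExtractB v)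
                    · simp only [if_neg h10]
                      by_cases h11 : PySem.Str.startswith v "1-0:31.7.0" = true
                      · simp only [if_pos h11]
                        exact pv_insert_L1_Amp s1 s2 s3 s4 s5 s6 s7 s8 s9 s10 s11 s12 s13 (pvExtractB v)
                      · simp only [if_neg h11]
                        by_cases h12 : PySem.Str.startswith v "1-0:71.7.0" = true
                        · simp only [if_pos h12]
                          exact pv_insert_L2_Amp s1 s2 s3 s4 s5 s6 s7 s8 s9 s10 s11 s12 s13 (pvExtractB v)
                        · simp only [if_neg h12]
                          by_cases h13 : PySem.Str.startswith v "1-0:51.7.0" = true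
                          · simp only [if_pos h13]
                            exact pv_insert_L3_Amp s1 s2 s3 s4 s5 s6 s7 s8 s9 s10 s11 s12 s13 (pvExtractB v)
                          · simp only [if_neg h13]

theorem pv_firstKey_eq (v : String) :
    pvFirstKey pvTable v =
    (if PySem.Str.startswith v "1-0:16.7.0" = true then some "Now"
    else if PySem.Str.startswith v "1-0:2.8.0" = true then some "Grid"
    else if PySem.Str.startswith v "1-0:1.8.0*96" = true then some "Day"
    else if PySem.Str.startswith v "1-0:1.8.0*97" = true then some "7-days"
    else if PySem.Str.startswith v "1-0:1.8.0*98" = true then some "30-days"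
    else if PySem.Str.startswith v "1-0:1.8.0*99" = true then some "365-days"
    else if PySem.Str.startswith v "1-0:1.8.0*100" = true then some "Total"
    else if PySem.Str.startswith v "1-0:32.7.0" = true then some "L1-Volt"
    else if PySem.Str.startswith v "1-0:72.7.0" = true then some "L2-Volt"
    else if PySem.Str.startswith v "1-0:52.7.0" = true then some "L3-Volt"
    else if PySem.Str.startswith v "1-0:31.7.0" = true then some "L1-Amp"
    else if PySem.Str.startswith v "1-0:71.7.0" = true then some "L2-Amp"
    else if PySem.Str.startswith v "1-0:51.7.0" = true then some "L3-Amp"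
    else none) := rfl

theorem pv_updB_mk (s1 s2 s3 s4 s5 s6 s7 s8 s9 s10 s11 s12 s13 v : String) :
    pvUpdB (pvMk s1 s2 s3 s4 s5 s6 s7 s8 s9 s10 s11 s12 s13) v = pvChain s1 s2 s3 s4 s5 s6 s7 s8 s9 s10 s11 s12 s13 v := by
  unfold pvUpdB pvChain
  rw [pv_firstKey_eq]
  by_cases h1 : PySem.Str.startswith v "1-0:16.7.0" = true
  · simp only [if_pos h1]
    exact pv_insert_Now s1 s2 s3 s4 s5 s6 s7 s8 s9 s10 s11 s12 s13 (pvExtractB v)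
  · simp only [if_neg h1]
    by_cases h2 : PySem.Str.startswith v "1-0:2.8.0" = true
    · simp only [if_pos h2]
      exact pv_insert_Grid s1 s2 s3 s4 s5 s6 s7 s8 s9 s10 s11 s12 s13 (pvExtractB v)
    · simp only [if_neg h2]
      by_cases h3 : PySem.Str.startswith v "1-0:1.8.0*96" = true
      · simp only [if_pos h3]
        exact pv_insert_Day s1 s2 s3 s4 s5 s6 s7 s8 s9 s10 s11 s12 s13 (pvExtractB v)
      · simp only [if_neg h3]
        by_cases h4 : PySem.Str.startswith v "1-0:1.8.0*97" = true
        · simp only [if_pos h4]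
          exact pv_insert_7_days s1 s2 s3 s4 s5 s6 s7 s8 s9 s10 s11 s12 s13 (pvExtractB v)
        · simp only [if_neg h4]
          by_cases h5 : PySem.Str.startswith v "1-0:1.8.0*98" = true
          · simp only [if_pos h5]
            exact pv_insert_30_days s1 s2 s3 s4 s5 s6 s7 s8 s9 s10 s11 s12 s13 (pvExtractB v)
          · simp only [if_neg h5]
            by_cases h6 : PySem.Str.startswith v "1-0:1.8.0*99" = true
            · simp only [if_pos h6]
              exact pv_insert_365_days s1 s2 s3 s4 s5 s6 s7 s8 s9 s10 s11 s12 s13 (pvExtractB v)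
            · simp only [if_neg h6]
              by_cases h7 : PySem.Str.startswith v "1-0:1.8.0*100" = true
              · simp only [if_pos h7]
                exact pv_insert_Total s1 s2 s3 s4 s5 s6 s7 s8 s9 s10 s11 s12 s13 (pvExtractB v)
              · simp only [if_neg h7]
                by_cases h8 : PySem.Str.startswith v "1-0:32.7.0" = true
                · simp only [if_pos h8]
                  exact pv_insert_L1_Volt s1 s2 s3 s4 s5 s6 s7 s8 s9 s10 s11 s12 s13 (pvExtractB v)
                · simp only [if_neg h8]
                  by_cases h9 : PySem.Str.startswith v "1-0:72.7.0" = true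
                  · simp only [if_pos h9]
                    exact pv_insert_L2_Volt s1 s2 s3 s4 s5 s6 s7 s8 s9 s10 s11 s12 s13 (pvExtractB v)
                  · simp only [if_neg h9]
                    by_cases h10 : PySem.Str.startswith v "1-0:52.7.0" = true
                    · simp only [if_pos h10]
                      exact pv_insert_L3_Volt s1 s2 s3 s4 s5 s6 s7 s8 s9 s10 s11 s12 s13 (pvExtractB v)
                    · simp only [if_neg h10]
                      by_cases h11 : PySem.Str.startswith v "1-0:31.7.0" = true
                      · simp only [if_pos h11]
                        exact pv_insert_L1_Amp s1 s2 s3 s4 s5 s6 s7 s8 s9 s10 s11 s12 s13 (pvExtractB v)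
                      · simp only [if_neg h11]
                        by_cases h12 : PySem.Str.startswith v "1-0:71.7.0" = true
                        · simp only [if_pos h12]
                          exact pv_insert_L2_Amp s1 s2 s3 s4 s5 s6 s7 s8 s9 s10 s11 s12 s13 (pvExtractB v)
                        · simp only [if_neg h12]
                          by_cases h13 : PySem.Str.startswith v "1-0:51.7.0" = true
                          · simp only [if_pos h13]
                            exact pv_insert_L3_Amp s1 s2 s3 s4 s5 s6 s7 s8 s9 s10 s11 s12 s13 (pvExtractB v)
                          · simp only [if_neg h13]

-- ---------- list-level helpers ----------
theorem pv_dropWhile_head?' (p : Char → Bool) (l : List Char) (c : Char) (hc : p c = true) :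
    (l.dropWhile p).head? ≠ some c := by
  have h := List.head?_dropWhile_not p l
  intro hh
  rw [hh] at h
  simp only at h
  rw [hc] at h
  exact Bool.true_eq_false.mp h

theorem pv_dropWhile_of_head? (l : List Char) (h : l.head? ≠ some '0') :
    l.dropWhile (fun c => c == '0') = l := by
  cases l with
  | nil => rfl
  | cons a t =>
    simp only [List.head?_cons, ne_eq, Option.some.injEq] at h
    rw [List.dropWhile_cons_of_neg (by simpa using h)]

theorem pv_take_head? (n : Nat) (l : List Char) (h : 0 < n) : (l.take n).head? = l.head? := by
  cases l with
  | nil => simp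
  | cons a t => cases n with
    | zero => omega
    | succ m => simp

-- ---------- string-level helpers ----------
theorem pv_lstrip0_toList (s : String) :
    (pvLstrip0 s).toList = s.toList.dropWhile (fun c => c == '0') := by
  simp [pvLstrip0]

theorem pv_lstrip0_of_head? (s : String) (h : s.toList.head? ≠ some '0') : pvLstrip0 s = s := by
  apply String.toList_inj.mp
  rw [pv_lstrip0_toList, pv_dropWhile_of_head? _ h]

theorem pv_find_nonneg_char (s : String) (c : Char) :
    (0 ≤ PySem.Str.find s (String.ofList [c])) ↔ c ∈ s.toList := by
  rw [PySem.Str.find_nonneg_iff, String.toList_ofList]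
  exact List.singleton_infix_iff c s.toList

theorem pv_slice1_toList (u : String) :
    (PySem.Str.slice u (some 1) none).toList = u.toList.tail := by
  simp [PySem.Str.toList_slice, PySem.Chars.slice_eq_listSlice, PySem.List.slice_from_one]

-- ---------- the pieces of _normalize ----------
def pvStep12 (v : String) : String :=
  let v1 := if 0 ≤ PySem.Str.find v "0" then pvLstrip0 v else v
  if 0 ≤ PySem.Str.find v1 "-" then
    "-" ++ pvLstrip0 (PySem.Str.slice v1 (some 1) none) else v1

def pvTrunc (v : String) : String :=
  let pp := PySem.Str.rfind v "."
  if pp > 0 then PySem.Str.slice v none (some (pp + 2)) else v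

theorem pv_normB_eq (k v : String) :
    pvNormB k v = if k == "Grid" then pvTrunc (pvStep12 v) else pvStep12 v := rfl

-- the shape invariant a normalized value satisfies
def pvGood (u : String) : Prop :=
  u.toList.head? ≠ some '0' ∧
  ('-' ∈ u.toList → ∃ w, u.toList = '-' :: w ∧ w.head? ≠ some '0')

theorem pv_step2_good (u : String) (h1 : u.toList.head? ≠ some '0') :
    pvGood (if 0 ≤ PySem.Str.find u "-" then
      "-" ++ pvLstrip0 (PySem.Str.slice u (some 1) none) else u) := by
  by_cases c2 : 0 ≤ PySem.Str.find u "-" <;> simp only [c2, ite_true, ite_false]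
  · constructor
    · rw [String.toList_append]
      simp
    · intro _
      refine ⟨(pvLstrip0 (PySem.Str.slice u (some 1) none)).toList, ?_, ?_⟩
      · rw [String.toList_append]; rfl
      · rw [pv_lstrip0_toList]
        exact pv_dropWhile_head?' _ _ '0' (by decide)
  · exact ⟨h1, fun hm => absurd hm (by
      rw [show ("-" : String) = String.ofList ['-'] from rfl, pv_find_nonneg_char] at c2
      exact c2)⟩

theorem pv_step12_good (v : String) : pvGood (pvStep12 v) := by
  unfold pvStep12
  by_cases c1 : 0 ≤ PySem.Str.find v "0" <;> simp only [c1, ite_true, ite_false]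
  · exact pv_step2_good _ (by rw [pv_lstrip0_toList]; exact pv_dropWhile_head?' _ _ '0' (by decide))
  · refine pv_step2_good _ ?_
    rw [show ("0" : String) = String.ofList ['0'] from rfl, pv_find_nonneg_char] at c1
    intro hh
    exact c1 (List.mem_of_mem_head? (by rw [hh]; simp))

theorem pv_step12_fix (u : String) (h : pvGood u) : pvStep12 u = u := by
  unfold pvStep12
  rw [pv_lstrip0_of_head? u h.1, ite_self]
  by_cases c2 : 0 ≤ PySem.Str.find u "-" <;> simp only [c2, ite_true, ite_false]
  rw [show ("-" : String) = String.ofList ['-'] from rfl, pv_find_nonneg_char] at c2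
  obtain ⟨w, hw, hwh⟩ := h.2 c2
  apply String.toList_inj.mp
  rw [String.toList_append, pv_lstrip0_toList, pv_slice1_toList, hw]
  rw [show ('-' :: w).tail = w from rfl, pv_dropWhile_of_head? w hwh]
  rfl
theorem pv_isPrefixOf_singleton (c : Char) (l : List Char) :
    [c].isPrefixOf l = true ↔ l.head? = some c := by
  cases l with
  | nil => simp [show ([c].isPrefixOf ([] : List Char)) = false from rfl]
  | cons a t =>
    rw [show ([c].isPrefixOf (a :: t)) = (c == a && true) from rfl, Bool.and_true]
    simp only [List.head?_cons, Option.some.injEq, beq_iff_eq]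
    exact eq_comm

-- rfind.go finds the HIGHEST index ≤ j at which sub occurs (or -1)
theorem pv_go_spec (s sub : List Char) (j : Nat) :
    (PySem.Chars.rfind.go s sub j = -1 ∧ ∀ i ≤ j, ¬ sub.isPrefixOf (s.drop i) = true) ∨
    (∃ p : Nat, PySem.Chars.rfind.go s sub j = (p : Int) ∧ p ≤ j ∧
      sub.isPrefixOf (s.drop p) = true ∧ ∀ i, p < i → i ≤ j → ¬ sub.isPrefixOf (s.drop i) = true) := by
  induction j with
  | zero =>
    rw [PySem.Chars.rfind.go]
    by_cases h : sub.isPrefixOf (s.drop 0) = true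
    · right
      exact ⟨0, by simpa using h, le_refl 0, by simpa using h, by omega⟩
    · left
      refine ⟨by simpa using h, ?_⟩
      intro i hi
      interval_cases i
      simpa using h
  | succ j ih =>
    rw [PySem.Chars.rfind.go]
    by_cases h : sub.isPrefixOf (s.drop (j+1)) = true
    · right
      refine ⟨j+1, by simp [h], le_refl _, h, by omega⟩
    · rw [if_neg h]
      rcases ih with ⟨h1, h2⟩ | ⟨p, h1, h2, h3, h4⟩
      · left
        refine ⟨h1, ?_⟩
        intro i hi
        rcases Nat.lt_or_ge i (j+1) with hlt | hge
        · exact h2 i (by omega)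
        · have : i = j + 1 := by omega
          subst this; simpa using h
      · right
        refine ⟨p, h1, by omega, h3, ?_⟩
        intro i hpi hij
        rcases Nat.lt_or_ge i (j+1) with hlt | hge
        · exact h4 i hpi (by omega)
        · have : i = j + 1 := by omega
          subst this; simpa using h

theorem pv_go_eq_of (s sub : List Char) (j p : Nat) (hpj : p ≤ j)
    (hp : sub.isPrefixOf (s.drop p) = true)
    (hmax : ∀ i, p < i → i ≤ j → ¬ sub.isPrefixOf (s.drop i) = true) :
    PySem.Chars.rfind.go s sub j = (p : Int) := by
  induction j with
  | zero =>
    have : p = 0 := by omega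
    subst this
    rw [PySem.Chars.rfind.go]
    simpa using (by simpa using hp)
  | succ j ih =>
    rw [PySem.Chars.rfind.go]
    rcases Nat.lt_or_ge p (j+1) with hlt | hge
    · have hnot : ¬ sub.isPrefixOf (s.drop (j+1)) = true := hmax (j+1) (by omega) (le_refl _)
      rw [if_neg hnot]
      exact ih (by omega) (fun i h1 h2 => hmax i h1 (by omega))
    · have : p = j + 1 := by omega
      subst this
      simp [hp]

theorem pv_rfind_spec (s : List Char) (c : Char) (p : Nat)
    (h : PySem.Chars.rfind s [c] = (p : Int)) :
    s[p]? = some c ∧ ∀ i : Nat, p < i → s[i]? ≠ some c := by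
  rw [PySem.Chars.rfind] at h
  rcases pv_go_spec s [c] s.length with ⟨h1, -⟩ | ⟨q, h1, h2, h3, h4⟩
  · rw [h1] at h; omega
  · rw [h1] at h
    have hqp : q = p := by exact_mod_cast h
    subst hqp
    constructor
    · rw [← List.head?_drop]
      exact (pv_isPrefixOf_singleton c _).mp h3
    · intro i hi hic
      rcases Nat.lt_or_ge s.length i with hlen | hlen
      · rw [List.getElem?_eq_none (by omega)] at hic
        simp at hic
      · exact h4 i hi hlen ((pv_isPrefixOf_singleton c _).mpr (by rw [List.head?_drop]; exact hic))

theorem pv_rfind_take (s : List Char) (c : Char) (p : Nat)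
    (h : PySem.Chars.rfind s [c] = (p : Int)) :
    PySem.Chars.rfind (s.take (p + 2)) [c] = (p : Int) := by
  obtain ⟨hp, hmax⟩ := pv_rfind_spec s c p h
  have hplen : p < s.length := by
    by_contra hc
    rw [List.getElem?_eq_none (by omega)] at hp
    simp at hp
  rw [PySem.Chars.rfind]
  apply pv_go_eq_of
  · simp only [List.length_take]
    omega
  · apply (pv_isPrefixOf_singleton c _).mpr
    rw [List.head?_drop, List.getElem?_take]
    simp only [if_pos (by omega : p < p + 2)]
    exact hp
  · intro i hpi hile
    rw [pv_isPrefixOf_singleton c _, List.head?_drop, List.getElem?_take]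
    split
    · exact hmax i hpi
    · intro hc
      simp at hc

theorem pv_trunc_eq_of_pos (u : String) (h : PySem.Str.rfind u "." > 0) :
    pvTrunc u = PySem.Str.slice u none (some (PySem.Str.rfind u "." + 2)) := by
  unfold pvTrunc; rw [if_pos h]

theorem pv_trunc_eq_of_nonpos (u : String) (h : ¬ PySem.Str.rfind u "." > 0) :
    pvTrunc u = u := by
  unfold pvTrunc; rw [if_neg h]

theorem pv_trunc_toList (u : String) (h : PySem.Str.rfind u "." > 0) :
    (pvTrunc u).toList = u.toList.take ((PySem.Str.rfind u ".").toNat + 2) := by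
  rw [pv_trunc_eq_of_pos u h, PySem.Str.toList_slice, PySem.Chars.slice_eq_listSlice,
    PySem.List.slice_to u.toList (by omega : (0:Int) ≤ PySem.Str.rfind u "." + 2)]
  congr 1
  omega

theorem pv_rfind_trunc (u : String) (h : PySem.Str.rfind u "." > 0) :
    PySem.Str.rfind (pvTrunc u) "." = PySem.Str.rfind u "." := by
  have hfind : PySem.Chars.rfind u.toList ['.'] = (((PySem.Str.rfind u ".").toNat : Nat) : Int) := by
    rw [show ['.'] = ("." : String).toList from rfl, ← PySem.Str.rfind_eq]
    omega
  rw [PySem.Str.rfind_eq, pv_trunc_toList u h, show ("." : String).toList = ['.'] from rfl,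
    pv_rfind_take _ _ _ hfind]
  omega

theorem pv_trunc_trunc (u : String) : pvTrunc (pvTrunc u) = pvTrunc u := by
  by_cases hp : PySem.Str.rfind u "." > 0
  · have hr : PySem.Str.rfind (pvTrunc u) "." = PySem.Str.rfind u "." := pv_rfind_trunc u hp
    rw [pv_trunc_eq_of_pos (pvTrunc u) (by rw [hr]; exact hp), hr]
    apply String.toList_inj.mp
    rw [PySem.Str.toList_slice, PySem.Chars.slice_eq_listSlice,
      PySem.List.slice_to _ (by omega : (0:Int) ≤ PySem.Str.rfind u "." + 2),
      pv_trunc_toList u hp, List.take_take]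
    congr 1
    omega
  · rw [pv_trunc_eq_of_nonpos u hp]
    exact pv_trunc_eq_of_nonpos u hp

theorem pv_trunc_good (u : String) (h : pvGood u) : pvGood (pvTrunc u) := by
  by_cases hp : PySem.Str.rfind u "." > 0
  · have ht := pv_trunc_toList u hp
    constructor
    · rw [ht, pv_take_head? _ _ (by omega)]
      exact h.1
    · intro hm
      rw [ht] at hm
      obtain ⟨w, hw, hwh⟩ := h.2 (List.mem_of_mem_take hm)
      refine ⟨w.take ((PySem.Str.rfind u ".").toNat + 1), ?_, ?_⟩
      · rw [ht, hw]
        rfl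
      · rw [pv_take_head? _ _ (by omega)]
        exact hwh
  · rw [pv_trunc_eq_of_nonpos u hp]
    exact h

theorem pv_idem (k v : String) : pvNormB k (pvNormB k v) = pvNormB k v := by
  rw [pv_normB_eq, pv_normB_eq]
  by_cases hk : (k == "Grid") = true <;> simp only [hk, ite_true, Bool.false_eq_true, ite_false]
  · rw [pv_step12_fix _ (pv_trunc_good _ (pv_step12_good v)), pv_trunc_trunc]
  · rw [pv_step12_fix _ (pv_step12_good v)]

-- one line of A = raw update then B's whole normalization pass
theorem pv_lineA_mk (s1 s2 s3 s4 s5 s6 s7 s8 s9 s10 s11 s12 s13 v : String) :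
    pvLineA (pvMk s1 s2 s3 s4 s5 s6 s7 s8 s9 s10 s11 s12 s13) v = pvPassB (pvUpdB (pvMk s1 s2 s3 s4 s5 s6 s7 s8 s9 s10 s11 s12 s13) v) := by
  unfold pvLineA
  rw [pv_updA_mk, pv_updB_mk]
  unfold pvChain
  by_cases h1 : PySem.Str.startswith v "1-0:16.7.0" = true
  · simp only [if_pos h1]
    rw [pv_passA, pv_passB]
  · simp only [if_neg h1]
    by_cases h2 : PySem.Str.startswith v "1-0:2.8.0" = true
    · simp only [if_pos h2]
      rw [pv_passA, pv_passB]
    · simp only [if_neg h2]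
      by_cases h3 : PySem.Str.startswith v "1-0:1.8.0*96" = true
      · simp only [if_pos h3]
        rw [pv_passA, pv_passB]
      · simp only [if_neg h3]
        by_cases h4 : PySem.Str.startswith v "1-0:1.8.0*97" = true
        · simp only [if_pos h4]
          rw [pv_passA, pv_passB]
        · simp only [if_neg h4]
          by_cases h5 : PySem.Str.startswith v "1-0:1.8.0*98" = true
          · simp only [if_pos h5]
            rw [pv_passA, pv_passB]
          · simp only [if_neg h5]
            by_cases h6 : PySem.Str.startswith v "1-0:1.8.0*99" = true
            · simp only [if_pos h6]
              rw [pv_passA, pv_passB]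
            · simp only [if_neg h6]
              by_cases h7 : PySem.Str.startswith v "1-0:1.8.0*100" = true
              · simp only [if_pos h7]
                rw [pv_passA, pv_passB]
              · simp only [if_neg h7]
                by_cases h8 : PySem.Str.startswith v "1-0:32.7.0" = true
                · simp only [if_pos h8]
                  rw [pv_passA, pv_passB]
                · simp only [if_neg h8]
                  by_cases h9 : PySem.Str.startswith v "1-0:72.7.0" = true
                  · simp only [if_pos h9]
                    rw [pv_passA, pv_passB]
                  · simp only [if_neg h9]
                    by_cases h10 : PySem.Str.startswith v "1-0:52.7.0" = true
                    · simp only [if_pos h10]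
                      rw [pv_passA, pv_passB]
                    · simp only [if_neg h10]
                      by_cases h11 : PySem.Str.startswith v "1-0:31.7.0" = true
                      · simp only [if_pos h11]
                        rw [pv_passA, pv_passB]
                      · simp only [if_neg h11]
                        by_cases h12 : PySem.Str.startswith v "1-0:71.7.0" = true
                        · simp only [if_pos h12]
                          rw [pv_passA, pv_passB]
                        · simp only [if_neg h12]
                          by_cases h13 : PySem.Str.startswith v "1-0:51.7.0" = true
                          · simp only [if_pos h13]
                            rw [pv_passA, pv_passB]
                          · simp only [if_neg h13]
                            rw [pv_passA, pv_passB]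

-- normalizing before a raw update changes nothing after the final pass (idempotence, lifted)
theorem pv_passB_comm (s1 s2 s3 s4 s5 s6 s7 s8 s9 s10 s11 s12 s13 v : String) :
    pvPassB (pvUpdB (pvMk (pvNormB "Now" s1) (pvNormB "Grid" s2) (pvNormB "Day" s3) (pvNormB "7-days" s4) (pvNormB "30-days" s5) (pvNormB "365-days" s6) (pvNormB "Total" s7) (pvNormB "L1-Volt" s8) (pvNormB "L2-Volt" s9) (pvNormB "L3-Volt" s10) (pvNormB "L1-Amp" s11) (pvNormB "L2-Amp" s12) (pvNormB "L3-Amp" s13)) v) = pvPassB (pvUpdB (pvMk s1 s2 s3 s4 s5 s6 s7 s8 s9 s10 s11 s12 s13) v) := by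
  rw [pv_updB_mk, pv_updB_mk]
  unfold pvChain
  by_cases h1 : PySem.Str.startswith v "1-0:16.7.0" = true
  · simp only [if_pos h1]
    rw [pv_passB, pv_passB]
    simp only [pv_idem]
  · simp only [if_neg h1]
    by_cases h2 : PySem.Str.startswith v "1-0:2.8.0" = true
    · simp only [if_pos h2]
      rw [pv_passB, pv_passB]
      simp only [pv_idem]
    · simp only [if_neg h2]
      by_cases h3 : PySem.Str.startswith v "1-0:1.8.0*96" = true
      · simp only [if_pos h3]
        rw [pv_passB, pv_passB]
        simp only [pv_idem]
      · simp only [if_neg h3]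
        by_cases h4 : PySem.Str.startswith v "1-0:1.8.0*97" = true
        · simp only [if_pos h4]
          rw [pv_passB, pv_passB]
          simp only [pv_idem]
        · simp only [if_neg h4]
          by_cases h5 : PySem.Str.startswith v "1-0:1.8.0*98" = true
          · simp only [if_pos h5]
            rw [pv_passB, pv_passB]
            simp only [pv_idem]
          · simp only [if_neg h5]
            by_cases h6 : PySem.Str.startswith v "1-0:1.8.0*99" = true
            · simp only [if_pos h6]
              rw [pv_passB, pv_passB]
              simp only [pv_idem]
            · simp only [if_neg h6]
              by_cases h7 : PySem.Str.startswith v "1-0:1.8.0*100" = true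
              · simp only [if_pos h7]
                rw [pv_passB, pv_passB]
                simp only [pv_idem]
              · simp only [if_neg h7]
                by_cases h8 : PySem.Str.startswith v "1-0:32.7.0" = true
                · simp only [if_pos h8]
                  rw [pv_passB, pv_passB]
                  simp only [pv_idem]
                · simp only [if_neg h8]
                  by_cases h9 : PySem.Str.startswith v "1-0:72.7.0" = true
                  · simp only [if_pos h9]
                    rw [pv_passB, pv_passB]
                    simp only [pv_idem]
                  · simp only [if_neg h9]
                    by_cases h10 : PySem.Str.startswith v "1-0:52.7.0" = true
                    · simp only [if_pos h10]
                      rw [pv_passB, pv_passB]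
                      simp only [pv_idem]
                    · simp only [if_neg h10]
                      by_cases h11 : PySem.Str.startswith v "1-0:31.7.0" = true
                      · simp only [if_pos h11]
                        rw [pv_passB, pv_passB]
                        simp only [pv_idem]
                      · simp only [if_neg h11]
                        by_cases h12 : PySem.Str.startswith v "1-0:71.7.0" = true
                        · simp only [if_pos h12]
                          rw [pv_passB, pv_passB]
                          simp only [pv_idem]
                        · simp only [if_neg h12]
                          by_cases h13 : PySem.Str.startswith v "1-0:51.7.0" = true
                          · simp only [if_pos h13]
                            rw [pv_passB, pv_passB]
                            simp only [pv_idem]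
                          · simp only [if_neg h13]
                            rw [pv_passB, pv_passB]
                            simp only [pv_idem]

theorem pv_updB_isMk (s1 s2 s3 s4 s5 s6 s7 s8 s9 s10 s11 s12 s13 v : String) :
    ∃ t1 t2 t3 t4 t5 t6 t7 t8 t9 t10 t11 t12 t13 : String,
      pvUpdB (pvMk s1 s2 s3 s4 s5 s6 s7 s8 s9 s10 s11 s12 s13) v = pvMk t1 t2 t3 t4 t5 t6 t7 t8 t9 t10 t11 t12 t13 := by
  rw [pv_updB_mk]
  unfold pvChain
  by_cases h1 : PySem.Str.startswith v "1-0:16.7.0" = true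
  · simp only [if_pos h1]
    exact ⟨_, _, _, _, _, _, _, _, _, _, _, _, _, rfl⟩
  · simp only [if_neg h1]
    by_cases h2 : PySem.Str.startswith v "1-0:2.8.0" = true
    · simp only [if_pos h2]
      exact ⟨_, _, _, _, _, _, _, _, _, _, _, _, _, rfl⟩
    · simp only [if_neg h2]
      by_cases h3 : PySem.Str.startswith v "1-0:1.8.0*96" = true
      · simp only [if_pos h3]
        exact ⟨_, _, _, _, _, _, _, _, _, _, _, _, _, rfl⟩
      · simp only [if_neg h3]
        by_cases h4 : PySem.Str.startswith v "1-0:1.8.0*97" = true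
        · simp only [if_pos h4]
          exact ⟨_, _, _, _, _, _, _, _, _, _, _, _, _, rfl⟩
        · simp only [if_neg h4]
          by_cases h5 : PySem.Str.startswith v "1-0:1.8.0*98" = true
          · simp only [if_pos h5]
            exact ⟨_, _, _, _, _, _, _, _, _, _, _, _, _, rfl⟩
          · simp only [if_neg h5]
            by_cases h6 : PySem.Str.startswith v "1-0:1.8.0*99" = true
            · simp only [if_pos h6]
              exact ⟨_, _, _, _, _, _, _, _, _, _, _, _, _, rfl⟩
            · simp only [if_neg h6]
              by_cases h7 : PySem.Str.startswith v "1-0:1.8.0*100" = true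
              · simp only [if_pos h7]
                exact ⟨_, _, _, _, _, _, _, _, _, _, _, _, _, rfl⟩
              · simp only [if_neg h7]
                by_cases h8 : PySem.Str.startswith v "1-0:32.7.0" = true
                · simp only [if_pos h8]
                  exact ⟨_, _, _, _, _, _, _, _, _, _, _, _, _, rfl⟩
                · simp only [if_neg h8]
                  by_cases h9 : PySem.Str.startswith v "1-0:72.7.0" = true
                  · simp only [if_pos h9]
                    exact ⟨_, _, _, _, _, _, _, _, _, _, _, _, _, rfl⟩
                  · simp only [if_neg h9]
                    by_cases h10 : PySem.Str.startswith v "1-0:52.7.0" = true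
                    · simp only [if_pos h10]
                      exact ⟨_, _, _, _, _, _, _, _, _, _, _, _, _, rfl⟩
                    · simp only [if_neg h10]
                      by_cases h11 : PySem.Str.startswith v "1-0:31.7.0" = true
                      · simp only [if_pos h11]
                        exact ⟨_, _, _, _, _, _, _, _, _, _, _, _, _, rfl⟩
                      · simp only [if_neg h11]
                        by_cases h12 : PySem.Str.startswith v "1-0:71.7.0" = true
                        · simp only [if_pos h12]
                          exact ⟨_, _, _, _, _, _, _, _, _, _, _, _, _, rfl⟩
                        · simp only [if_neg h12]
                          by_cases h13 : PySem.Str.startswith v "1-0:51.7.0" = true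
                          · simp only [if_pos h13]
                            exact ⟨_, _, _, _, _, _, _, _, _, _, _, _, _, rfl⟩
                          · simp only [if_neg h13]
                            exact ⟨_, _, _, _, _, _, _, _, _, _, _, _, _, rfl⟩

-- main loop invariant: A's state after each further line stays B's raw state, normalized
theorem pv_loop (l : List String) : ∀ (s1 s2 s3 s4 s5 s6 s7 s8 s9 s10 s11 s12 s13 : String),
    List.foldl pvLineA (pvPassB (pvMk s1 s2 s3 s4 s5 s6 s7 s8 s9 s10 s11 s12 s13)) l = pvPassB (List.foldl pvUpdB (pvMk s1 s2 s3 s4 s5 s6 s7 s8 s9 s10 s11 s12 s13) l) := by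
  induction l with
  | nil =>
    intro s1 s2 s3 s4 s5 s6 s7 s8 s9 s10 s11 s12 s13
    rw [List.foldl_nil, List.foldl_nil]
  | cons v t ih =>
    intro s1 s2 s3 s4 s5 s6 s7 s8 s9 s10 s11 s12 s13
    rw [List.foldl_cons, List.foldl_cons, pv_passB, pv_lineA_mk, pv_passB_comm]
    obtain ⟨t1, t2, t3, t4, t5, t6, t7, t8, t9, t10, t11, t12, t13, ht⟩ := pv_updB_isMk s1 s2 s3 s4 s5 s6 s7 s8 s9 s10 s11 s12 s13 v
    rw [ht]
    exact ih t1 t2 t3 t4 t5 t6 t7 t8 t9 t10 t11 t12 t13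

-- ===== VERDICT (by name: the statement is the Claim_ definition above) =====
theorem processdata_spec : Claim_equal_processdata := by
  intro lijst _ _
  unfold Spec_processdata processdata processdata_alt
  match lijst with
  | none => rfl
  | some l =>
    by_cases h13 : 13 ≤ l.length <;> simp only [h13, ite_true, ite_false]
    · match l, h13 with
      | v :: t, _ =>
        show (List.foldl pvLineA pvInitA (v :: t)).items = (pvPassB (List.foldl pvUpdB pvInitB (v :: t))).items
        rw [show pvInitA = pvMk "fake!" "11" "8" "50" "200" "2500" "14000" "230" "230" "230" "1.0" "1.0" "1.0" from rfl,
            show pvInitB = pvMk "fake!" "11" "8" "50" "200" "2500" "14000" "230" "230" "230" "1.0" "1.0" "1.0" from rfl,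
            List.foldl_cons, List.foldl_cons, pv_lineA_mk]
        obtain ⟨t1, t2, t3, t4, t5, t6, t7, t8, t9, t10, t11, t12, t13, ht⟩ :=
          pv_updB_isMk "fake!" "11" "8" "50" "200" "2500" "14000" "230" "230" "230" "1.0" "1.0" "1.0" v
        rw [ht, pv_loop t]
    · rfl
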